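-- pv_equiv track=rewrite | github.com/Leewuc/Programmers | 프로그래머스/1/132267. 콜라 문제/콜라 문제.py | solution
-- ===== SOURCE A (Python) =====
-- def solution(a, b, n):
--     answer = 0
--     while(n >= a):
--         real_end = n % a
--         n = (n//a) * b
--         answer += n
--         n += real_end
--     return answer
-- ===== SOURCE B (Python) =====
-- def solution(a, b, n):
--     # Closed form: each exchange of a empties yields b bottles, i.e. net loss a-b
--     # per b gained; total received = ((n - b) // (a - b)) * b once n >= a.
--     if n < a:
--         return 0
--     return (n - b) // (a - b) * b
-- ===== Notes on version B (the rewrite author's own statement) =====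
-- stated objective: alternative
-- what changed: Replaces the while-loop exchange simulation by the closed-form formula ((n-b)//(a-b))*b (0 when n<a).
-- outside the precondition, e.g. on solution(3, -2, 10): A returns -6, B returns -4
import Mathlib
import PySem

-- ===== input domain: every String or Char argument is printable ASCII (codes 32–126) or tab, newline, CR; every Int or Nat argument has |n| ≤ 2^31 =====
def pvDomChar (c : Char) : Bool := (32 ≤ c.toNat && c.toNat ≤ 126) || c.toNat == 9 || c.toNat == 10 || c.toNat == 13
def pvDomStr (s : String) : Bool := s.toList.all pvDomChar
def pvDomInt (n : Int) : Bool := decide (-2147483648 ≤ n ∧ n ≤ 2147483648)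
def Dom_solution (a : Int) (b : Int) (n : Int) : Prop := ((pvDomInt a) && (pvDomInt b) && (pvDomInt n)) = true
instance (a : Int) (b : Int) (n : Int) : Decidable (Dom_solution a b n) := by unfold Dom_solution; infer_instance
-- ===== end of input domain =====

-- B replaces A's while-loop exchange simulation by the closed form ((n-b)//(a-b))*b.


-- ===== PORT A =====
-- the while-loop, with fuel only to make the recursion total (never exhausted inside Pre_)
def solutionLoop (fuel : Nat) (a b n answer : Int) : Int :=
  match fuel with
  | 0 => answer
  | f + 1 =>
    if n ≥ a then
      let real_end := PySem.Int.mod n a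
      let n2 := (PySem.Int.floordiv n a) * b
      solutionLoop f a b (n2 + real_end) (answer + n2)
    else answer

def solution (a : Int) (b : Int) (n : Int) : Int :=
  solutionLoop (n.toNat + 1) a b n 0

-- ===== PORT B =====
def solution_alt (a : Int) (b : Int) (n : Int) : Int :=
  if n < a then 0 else (PySem.Int.floordiv (n - b) (a - b)) * b

-- ===== PRECONDITION & SPEC =====
-- Pre_ restricts to the problem's natural domain 0 ≤ b < a (plus the trivial n < a, where
-- the loop never runs): for n ≥ a with b ≥ a the Python A diverges, and for n ≥ a with
-- b < 0 (nonsense: a negative number of bottles handed back) A's simulated value is an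
-- artefact outside the task's natural domain, which B does not reproduce.
def Pre_solution (a : Int) (b : Int) (n : Int) : Prop := n < a ∨ (0 ≤ b ∧ b < a)
instance (a : Int) (b : Int) (n : Int) : Decidable (Pre_solution a b n) := by unfold Pre_solution; infer_instance
def pvWitness_solution : Int × Int × Int := (2, 1, 20)
def Spec_solution (a : Int) (b : Int) (n : Int) (out : Int) : Prop := out = solution_alt a b n
instance (a : Int) (b : Int) (n : Int) (out : Int) : Decidable (Spec_solution a b n out) := by unfold Spec_solution; infer_instance

-- ===== CLAIM (what is proved, stated in full; the proofs are below) =====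
def Claim_equal_solution : Prop := ∀ (a : Int) (b : Int) (n : Int), Dom_solution a b n → Pre_solution a b n → Spec_solution a b n (solution a b n)

-- ===== LEMMAS AND PROOFS =====

-- the closed form g(n) that the loop accumulates
theorem solutionLoop_closed (a b : Int) (hb : 0 ≤ b) (hba : b < a) :
    ∀ (fuel : Nat) (n acc : Int), n.toNat < fuel →
      solutionLoop fuel a b n acc
        = acc + (if n ≥ a then (PySem.Int.floordiv (n - b) (a - b)) * b else 0) := by
  intro fuel
  induction fuel with
  | zero => intro n acc h; omega
  | succ f ih =>
    intro n acc h
    have ha : 0 < a := by omega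
    have hab : 0 < a - b := by omega
    by_cases hna : n ≥ a
    · simp only [solutionLoop, if_pos hna]
      have hmod : PySem.Int.mod n a = n % a := PySem.Int.mod_eq_emod_of_pos ha
      have hdiv : PySem.Int.floordiv n a = n / a := PySem.Int.floordiv_eq_ediv_of_pos ha
      set q := n / a with hq
      set r := n % a with hr
      have hr0 : 0 ≤ r := Int.emod_nonneg n (by omega)
      have hra : r < a := Int.emod_lt_of_pos n ha
      have hqa : n = q * a + r := by
        have h := Int.mul_ediv_add_emod n a
        rw [← hq, ← hr] at h; linarith
      have hq1 : 1 ≤ q := by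
        rw [hq, Int.le_ediv_iff_mul_le ha]; omega
      set n' := q * b + r with hn'
      have hn'0 : 0 ≤ n' := by nlinarith
      have hlt : n' < n := by nlinarith
      have hfuel : n'.toNat < f := by omega
      rw [hmod, hdiv, ih (q * b + r) _ hfuel]
      have hsplit : n - b = (n' - b) + q * (a - b) := by rw [hn', hqa]; ring
      have hfd : PySem.Int.floordiv (n - b) (a - b) = (n - b) / (a - b) :=
        PySem.Int.floordiv_eq_ediv_of_pos hab
      have hfd' : PySem.Int.floordiv (n' - b) (a - b) = (n' - b) / (a - b) :=
        PySem.Int.floordiv_eq_ediv_of_pos hab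
      have hmain : (n - b) / (a - b) = (n' - b) / (a - b) + q := by
        rw [hsplit, Int.add_mul_ediv_right _ _ (by omega : a - b ≠ 0)]
      by_cases hn'a : n' ≥ a
      · rw [if_pos hn'a, hfd, hfd', hmain]; ring
      · rw [if_neg hn'a, hfd, hmain]
        have hnb : b ≤ n' := by nlinarith
        have hzero : (n' - b) / (a - b) = 0 :=
          Int.ediv_eq_zero_of_lt (by omega) (by omega)
        rw [hzero]; ring
    · simp only [solutionLoop, if_neg hna]; ring

-- ===== VERDICT (by name: the statement is the Claim_ definition above) =====
theorem solution_spec : Claim_equal_solution := by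
  intro a b n _ hpre
  unfold Spec_solution solution solution_alt
  by_cases hna : n < a
  · -- loop exits immediately (fuel ≥ 1)
    simp [solutionLoop, not_le.mpr hna, hna]
  · rcases hpre with h | ⟨hb, hba⟩
    · omega
    · rw [solutionLoop_closed a b hb hba (n.toNat + 1) n 0 (by omega)]
      rw [if_pos (by omega : n ≥ a), if_neg hna]; ring
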